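-- pv_equiv track=rewrite | github.com/edantonio505/a3up_game | elements.py | get_width_posx_multiple_platform
-- ===== SOURCE A (Python) =====
-- def get_width_posx_multiple_platform(platform, block_width):
--     first_block = 0
--     posx_array = []
--     width_array = []
--     posx = 0
--     for i in range(len(platform)):
--         platform_width = 0
--         try:
--             if platform[i] == " " and platform[i+1] == "#":
--                 posx = (i+1)*block_width
--                 posx_array.append(posx)
--         except:
--             pass
--     count = 0
--     for i in range(len(platform)):
--         if platform[i] == "#":
--             count += block_width
--         elif platform[i] == " ":
--             if count > 0:
--                 width_array.append(count)
--             count = 0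
--     return zip(width_array, posx_array)
-- ===== SOURCE B (Python) =====
-- def get_width_posx_multiple_platform(platform, block_width):
--     # posx: positions right after a " #" boundary, found by scanning adjacent pairs
--     posx_array = [(i + 1) * block_width
--                   for i, pair in enumerate(zip(platform, platform[1:]))
--                   if pair == (" ", "#")]
--     # widths: tokenize on spaces; each space flushes block_width * (#-count of the
--     # token before it); the token after the last space is never flushed -> [:-1]
--     widths = [block_width * token.count("#") for token in platform.split(" ")[:-1]]
--     width_array = [w for w in widths if w > 0]
--     return zip(width_array, posx_array)
-- ===== Notes on version B (the rewrite author's own statement) =====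
-- stated objective: idiomatic
-- what changed: Replaces A's two index-based character scans (with try/except pair test and a manual count/flush state machine) by tokenization: adjacent-pair matching over zip(platform, platform[1:]) for the positions, and platform.split(" ")[:-1] tokens with per-token '#' counts for the widths.
import Mathlib
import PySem

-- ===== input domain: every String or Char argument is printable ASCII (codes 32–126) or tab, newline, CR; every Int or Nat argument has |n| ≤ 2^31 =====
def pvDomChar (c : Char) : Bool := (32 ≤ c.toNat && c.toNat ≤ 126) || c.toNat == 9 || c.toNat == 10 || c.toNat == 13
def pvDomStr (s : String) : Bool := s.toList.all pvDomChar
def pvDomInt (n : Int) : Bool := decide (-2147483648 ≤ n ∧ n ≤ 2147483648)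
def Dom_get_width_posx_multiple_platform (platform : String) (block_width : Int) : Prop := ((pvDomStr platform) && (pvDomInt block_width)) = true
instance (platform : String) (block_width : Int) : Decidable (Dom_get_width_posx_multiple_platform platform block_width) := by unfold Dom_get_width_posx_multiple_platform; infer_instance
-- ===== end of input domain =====

-- B replaces A's two indexed character scans by tokenization: adjacent-pair matching for the
-- positions and split-on-space tokens for the widths (objective: idiomatic; same exact output,
-- including the dropped trailing run and zip truncation).

-- ===== PORT A =====
-- literal transliteration of A's two index loops; the try/except around the pair test is the
-- `match` on the two pyGet? results (none = IndexError = pass)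
def get_width_posx_multiple_platform (platform : String) (block_width : Int) : List (Int × Int) :=
  let cs := platform.toList
  let posx_array := (PySem.List.pyRange 0 (PySem.List.len cs) 1).foldl (fun acc i =>
      match PySem.List.pyGet? cs i, PySem.List.pyGet? cs (i+1) with
      | some c, some d => if c = ' ' ∧ d = '#' then acc ++ [(i+1)*block_width] else acc
      | _, _ => acc) []
  let st := (PySem.List.pyRange 0 (PySem.List.len cs) 1).foldl (fun (st : List Int × Int) i =>
      -- the index i is always in range here, so the pyGetD default is never read
      if PySem.List.pyGetD cs i '?' = '#' then (st.1, st.2 + block_width)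
      else if PySem.List.pyGetD cs i '?' = ' ' then ((if st.2 > 0 then st.1 ++ [st.2] else st.1), 0)
      else st) ([], 0)
  List.zip st.1 posx_array

-- ===== PORT B =====
-- transliteration of Source B: platform[1:] is cs.drop 1 and tokens[:-1] is dropLast (both exact
-- for every list); token.count("#") is PySem.Chars.count token ['#']
def get_width_posx_multiple_platform_alt (platform : String) (block_width : Int) : List (Int × Int) :=
  let cs := platform.toList
  let posx_array := ((PySem.List.enumerate (List.zip cs (cs.drop 1)) 0).filter
      (fun p => p.2 == (' ', '#'))).map (fun p => (p.1 + 1) * block_width)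
  let widths := ((PySem.Chars.splitOn cs [' ']).dropLast).map
      (fun t => block_width * (PySem.Chars.count t ['#'] : Int))
  let width_array := widths.filter (fun w => decide (w > 0))
  List.zip width_array posx_array

-- ===== PRECONDITION & SPEC =====
def Spec_get_width_posx_multiple_platform (platform : String) (block_width : Int) (out : List (Int × Int)) : Prop := out = get_width_posx_multiple_platform_alt platform block_width
instance (platform : String) (block_width : Int) (out : List (Int × Int)) : Decidable (Spec_get_width_posx_multiple_platform platform block_width out) := by unfold Spec_get_width_posx_multiple_platform; infer_instance

-- ===== CLAIM (what is proved, stated in full; the proofs are below) =====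
def Claim_equal_get_width_posx_multiple_platform : Prop := ∀ (platform : String) (block_width : Int), Dom_get_width_posx_multiple_platform platform block_width → Spec_get_width_posx_multiple_platform platform block_width (get_width_posx_multiple_platform platform block_width)

-- ===== LEMMAS AND PROOFS =====

-- structural version of s.split(" ")
def pvSplit : List Char → List (List Char)
  | [] => [[]]
  | c :: r => if c = ' ' then [] :: pvSplit r else
      match pvSplit r with
      | t :: ts => (c :: t) :: ts
      | [] => [[c]]   -- unreachable: pvSplit is never []

theorem pvSplit_ne_nil (l : List Char) : pvSplit l ≠ [] := by
  induction l with
  | nil => simp [pvSplit]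
  | cons c r _ =>
    simp only [pvSplit]
    split
    · simp
    · cases h : pvSplit r <;> simp

theorem splitOn_go_eq (fuel : Nat) (l cur : List Char) (acc : List (List Char))
    (h : l.length ≤ fuel) :
    PySem.Chars.splitOn.go [' '] fuel l cur acc =
      acc.reverse ++ (match pvSplit l with
        | t :: ts => (cur.reverse ++ t) :: ts
        | [] => [cur.reverse]) := by
  induction fuel generalizing l cur acc with
  | zero =>
    have : l = [] := by cases l <;> simp_all
    subst this
    simp [PySem.Chars.splitOn.go, pvSplit]
  | succ f ih =>
    cases l with
    | nil => simp [PySem.Chars.splitOn.go, pvSplit]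
    | cons c rest =>
      by_cases hc : c = ' '
      · subst hc
        rw [show PySem.Chars.splitOn.go [' '] (f+1) (' ' :: rest) cur acc
            = PySem.Chars.splitOn.go [' '] f rest [] (cur.reverse :: acc) by
          simp [PySem.Chars.splitOn.go, List.isPrefixOf]]
        rw [ih rest [] (cur.reverse :: acc) (by simpa using Nat.lt_succ_iff.mp (Nat.lt_of_lt_of_le (Nat.lt_succ_self _) h))]
        cases hs : pvSplit rest with
        | nil => exact absurd hs (pvSplit_ne_nil rest)
        | cons t ts => simp [pvSplit, hs]
      · rw [show PySem.Chars.splitOn.go [' '] (f+1) (c :: rest) cur acc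
            = PySem.Chars.splitOn.go [' '] f rest (c :: cur) acc by
          simp [PySem.Chars.splitOn.go, List.isPrefixOf, Ne.symm hc]]
        rw [ih rest (c :: cur) acc (by simpa using Nat.le_of_succ_le_succ h)]
        cases hs : pvSplit rest with
        | nil => exact absurd hs (pvSplit_ne_nil rest)
        | cons t ts => simp [pvSplit, hs, hc]

theorem splitOn_eq_pvSplit (cs : List Char) : PySem.Chars.splitOn cs [' '] = pvSplit cs := by
  rw [PySem.Chars.splitOn, splitOn_go_eq _ _ _ _ (Nat.le_succ _)]
  cases hs : pvSplit cs with
  | nil => exact absurd hs (pvSplit_ne_nil cs)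
  | cons t ts => simp

theorem count_single_go (fuel : Nat) (l : List Char) (acc : Nat) (h : l.length ≤ fuel) :
    PySem.Chars.count.go ['#'] fuel l acc = acc + l.count '#' := by
  induction fuel generalizing l acc with
  | zero =>
    have : l = [] := by cases l <;> simp_all
    subst this; simp [PySem.Chars.count.go]
  | succ f ih =>
    cases l with
    | nil => simp [PySem.Chars.count.go]
    | cons c rest =>
      by_cases hc : c = '#'
      · subst hc
        rw [show PySem.Chars.count.go ['#'] (f+1) ('#' :: rest) acc
            = PySem.Chars.count.go ['#'] f rest (acc+1) by
          simp [PySem.Chars.count.go, List.isPrefixOf]]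
        rw [ih rest (acc+1) (by simpa using Nat.le_of_succ_le_succ h)]
        simp
        omega
      · rw [show PySem.Chars.count.go ['#'] (f+1) (c :: rest) acc
            = PySem.Chars.count.go ['#'] f rest acc by
          simp [PySem.Chars.count.go, List.isPrefixOf, Ne.symm hc]]
        rw [ih rest acc (by simpa using Nat.le_of_succ_le_succ h)]
        simp [hc]

theorem count_single (t : List Char) : PySem.Chars.count t ['#'] = t.count '#' := by
  rw [PySem.Chars.count]
  simp [count_single_go t.length t 0 (le_refl _)]

-- the width loop as a structural recursion
def pvWidths (bw : Int) : Int → List Char → List Int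
  | _, [] => []
  | c, x :: r =>
    if x = '#' then pvWidths bw (c + bw) r
    else if x = ' ' then (if c > 0 then [c] else []) ++ pvWidths bw 0 r
    else pvWidths bw c r

theorem widths_foldl (bw : Int) (cs : List Char) (acc : List Int) (c : Int) :
    (cs.foldl (fun (st : List Int × Int) x =>
      if x = '#' then (st.1, st.2 + bw)
      else if x = ' ' then ((if st.2 > 0 then st.1 ++ [st.2] else st.1), 0)
      else st) (acc, c)).1 = acc ++ pvWidths bw c cs := by
  induction cs generalizing acc c with
  | nil => simp [pvWidths]
  | cons x r ih =>
    by_cases h1 : x = '#'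
    · simp [pvWidths, h1, List.foldl_cons, ih]
    · by_cases h2 : x = ' '
      · by_cases h3 : c > 0 <;>
          simp [pvWidths, h2, h3, List.foldl_cons, ih]
      · simp [pvWidths, h1, h2, List.foldl_cons, ih]

theorem widths_split (bw : Int) (cs : List Char) (c : Int) :
    pvWidths bw c cs =
      ((match pvSplit cs with
        | t :: ts => (c + bw * (t.count '#' : Int)) :: ts.map (fun (t : List Char) => bw * (t.count '#' : Int))
        | [] => []).dropLast).filter (fun w => decide (w > 0)) := by
  induction cs generalizing c with
  | nil => simp [pvWidths, pvSplit]
  | cons x r ih =>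
    by_cases h1 : x = '#'
    · subst h1
      cases hs : pvSplit r with
      | nil => exact absurd hs (pvSplit_ne_nil r)
      | cons t ts =>
        simp only [pvWidths, pvSplit, hs, reduceIte, ih (c + bw)]
        simp [mul_add]
        ring_nf
    · by_cases h2 : x = ' '
      · subst h2
        cases hs : pvSplit r with
        | nil => exact absurd hs (pvSplit_ne_nil r)
        | cons t ts =>
          simp only [pvWidths, ih 0, pvSplit, hs, reduceIte]
          by_cases h3 : c > 0 <;>
            simp [h3, List.dropLast_cons_of_ne_nil]
      · cases hs : pvSplit r with
        | nil => exact absurd hs (pvSplit_ne_nil r)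
        | cons t ts =>
          simp only [pvWidths, h1, h2, reduceIte, pvSplit, hs, ih c]
          simp [h1]

theorem widths_eq (cs : List Char) (bw : Int) :
    ((PySem.List.pyRange 0 (PySem.List.len cs) 1).foldl (fun (st : List Int × Int) i =>
      if PySem.List.pyGetD cs i '?' = '#' then (st.1, st.2 + bw)
      else if PySem.List.pyGetD cs i '?' = ' ' then ((if st.2 > 0 then st.1 ++ [st.2] else st.1), 0)
      else st) ([], 0)).1
    = (((PySem.Chars.splitOn cs [' ']).dropLast).map
        (fun t => bw * (PySem.Chars.count t ['#'] : Int))).filter (fun w => decide (w > 0)) := by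
  rw [show ((PySem.List.pyRange 0 (PySem.List.len cs) 1).foldl (fun (st : List Int × Int) i =>
      if PySem.List.pyGetD cs i '?' = '#' then (st.1, st.2 + bw)
      else if PySem.List.pyGetD cs i '?' = ' ' then ((if st.2 > 0 then st.1 ++ [st.2] else st.1), 0)
      else st) ([], 0))
    = cs.foldl (fun (st : List Int × Int) x =>
      if x = '#' then (st.1, st.2 + bw)
      else if x = ' ' then ((if st.2 > 0 then st.1 ++ [st.2] else st.1), 0)
      else st) ([], 0) from
    PySem.List.foldl_pyRange_zero_pyGetD cs '?' (fun st x =>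
      if x = '#' then (st.1, st.2 + bw)
      else if x = ' ' then ((if st.2 > 0 then st.1 ++ [st.2] else st.1), 0)
      else st) ([], 0)]
  rw [widths_foldl bw cs [] 0, List.nil_append, widths_split bw cs 0, splitOn_eq_pvSplit]
  cases hs : pvSplit cs with
  | nil => exact absurd hs (pvSplit_ne_nil cs)
  | cons t ts =>
    simp only [count_single, zero_add]
    rw [List.map_dropLast, List.map_cons]

theorem posx_eq (cs : List Char) (bw : Int) :
    (PySem.List.pyRange 0 (PySem.List.len cs) 1).foldl (fun acc i =>
      match PySem.List.pyGet? cs i, PySem.List.pyGet? cs (i+1) with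
      | some c, some d => if c = ' ' ∧ d = '#' then acc ++ [(i+1)*bw] else acc
      | _, _ => acc) []
    = ((PySem.List.enumerate (List.zip cs (cs.drop 1)) 0).filter
      (fun p => p.2 == (' ', '#'))).map (fun p => (p.1 + 1) * bw) := by
  have hfun : (fun (acc : List Int) (i : Int) =>
      match PySem.List.pyGet? cs i, PySem.List.pyGet? cs (i+1) with
      | some c, some d => if c = ' ' ∧ d = '#' then acc ++ [(i+1)*bw] else acc
      | _, _ => acc)
      = fun acc i => if ((PySem.List.pyGet? cs i == some ' ') && (PySem.List.pyGet? cs (i+1) == some '#'))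
          then acc ++ [(i+1)*bw] else acc := by
    funext acc i
    cases h1 : PySem.List.pyGet? cs i <;> cases h2 : PySem.List.pyGet? cs (i+1) <;> simp
  rw [hfun, PySem.List.foldl_append_if]
  rw [PySem.List.enumerate_eq_map_pyRange (List.zip cs (cs.drop 1)) ('?','?'), List.filter_map, List.map_map]
  cases cs with
  | nil => simp [PySem.List.pyRange_one_eq_nil, PySem.List.len]
  | cons c0 r =>
    set cs := c0 :: r with hcs
    have hlz : (List.zip cs (cs.drop 1)).length = cs.length - 1 := by
      simp [List.length_zip]
    have hlen : PySem.List.len (List.zip cs (cs.drop 1)) = (cs.length : Int) - 1 := by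
      rw [PySem.List.len_eq, hlz]
      have h1 : 1 ≤ cs.length := by simp [hcs]
      omega
    rw [hlen]
    have hsplit : PySem.List.pyRange 0 (PySem.List.len cs) 1
        = PySem.List.pyRange 0 ((cs.length : Int) - 1) 1 ++ PySem.List.pyRange ((cs.length : Int) - 1) (cs.length : Int) 1 := by
      rw [PySem.List.len_eq]
      exact PySem.List.pyRange_one_append 0 ((cs.length : Int) - 1) (cs.length) (by simp [hcs]) (by omega)
    rw [hsplit, List.filter_append]
    have hsing : PySem.List.pyRange ((cs.length : Int) - 1) (cs.length : Int) 1 = [(cs.length : Int) - 1] := by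
      have := PySem.List.pyRange_one_singleton ((cs.length : Int) - 1)
      simpa using this
    have hlast : PySem.List.pyGet? cs (((cs.length : Int) - 1) + 1) = none := by
      have : ((cs.length : Int) - 1) + 1 = ((cs.length : Nat) : Int) := by omega
      rw [this, PySem.List.pyGet?_natCast]
      simp
    rw [hsing]
    simp only [List.filter_cons, List.filter_nil, hlast]
    simp only [show ((PySem.List.pyGet? cs ((cs.length : Int) - 1) == some ' ') && ((none : Option Char) == some '#')) = false by simp]
    simp only [Bool.false_eq_true, if_false, List.append_nil, List.nil_append]
    have hmap : ((fun (p : Int × Char × Char) => (p.1 + 1) * bw) ∘ fun j => (j, PySem.List.pyGetD (cs.zip (List.drop 1 cs)) j ('?', '?'))) = fun j => (j + 1) * bw := by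
      funext j; simp
    rw [hmap]
    congr 1
    apply List.filter_congr
    intro j hj
    obtain ⟨h0, h1⟩ := PySem.List.mem_pyRange_one.mp hj
    simp only [Function.comp_apply]
    have hk : j = ((j.toNat : Nat) : Int) := by omega
    have hk1 : j.toNat < cs.length - 1 := by omega
    rw [hk, PySem.List.pyGet?_natCast]
    have hlt : j.toNat + 1 < cs.length := by omega
    have hg2 : ((j.toNat : Int) + 1) = ((j.toNat + 1 : Nat) : Int) := by push_cast; ring
    rw [hg2, PySem.List.pyGet?_natCast]
    rw [PySem.List.pyGetD_eq_getElem _ _ (by omega) (by rw [hlz]; omega)]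
    simp only [Int.toNat_natCast]
    rw [List.getElem_zip]
    have hb : j.toNat < cs.length := by omega
    rw [List.getElem?_eq_getElem hb, List.getElem?_eq_getElem hlt]
    rfl

-- ===== VERDICT (by name: the statement is the Claim_ definition above) =====
theorem get_width_posx_multiple_platform_spec : Claim_equal_get_width_posx_multiple_platform := by
  intro platform block_width _
  show get_width_posx_multiple_platform platform block_width
      = get_width_posx_multiple_platform_alt platform block_width
  simp only [get_width_posx_multiple_platform, get_width_posx_multiple_platform_alt]
  rw [posx_eq platform.toList block_width, widths_eq platform.toList block_width]
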